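-- pv_equiv track=rewrite | github.com/PavelVesely/SplineSketch-experiments | helper_funcs.py | compute_true_ranks
-- ===== SOURCE A (Python) =====
-- import bisect
--
-- def compute_true_ranks(data, queries):
--     """
--     Compute the number of items in the data that are less than or equal to each query.
--
--     Args:
--         data (list of float): The data to query.
--         queries (list of float): The queries to compute fractions for.
--
--     Returns:
--         list of float: A list of fractions, where each fraction is the proportion of items in the data that are less than or equal to the corresponding query.
--     """
--     data_sorted = sorted(data)
--     ranks = []
--     for query in queries:
--         idx = bisect.bisect_right(data_sorted, query)
--         rank = idx
--         ranks.append(rank)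
--     return ranks
-- ===== SOURCE B (Python) =====
-- def compute_true_ranks(data, queries):
--     """
--     Compute the number of items in the data that are less than or equal to each query.
--
--     Two-pointer merge: process queries in ascending order (via an index ordering),
--     advancing a single pointer through the sorted data, and scatter the ranks back
--     to the original query positions.
--     """
--     data_sorted = sorted(data)
--     n = len(data_sorted)
--     order = sorted(range(len(queries)), key=queries.__getitem__)
--     ranks = [0] * len(queries)
--     j = 0
--     for i in order:
--         q = queries[i]
--         while j < n and data_sorted[j] <= q:
--             j += 1
--         ranks[i] = j
--     return ranks
-- ===== Notes on version B (the rewrite author's own statement) =====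
-- stated objective: alternative
-- what changed: Replaces per-query binary search (bisect_right on sorted data) with a single two-pointer merge: query indices are sorted by query value and one pointer sweeps the sorted data once, scattering each rank back to the query's original position.
import Mathlib
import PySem

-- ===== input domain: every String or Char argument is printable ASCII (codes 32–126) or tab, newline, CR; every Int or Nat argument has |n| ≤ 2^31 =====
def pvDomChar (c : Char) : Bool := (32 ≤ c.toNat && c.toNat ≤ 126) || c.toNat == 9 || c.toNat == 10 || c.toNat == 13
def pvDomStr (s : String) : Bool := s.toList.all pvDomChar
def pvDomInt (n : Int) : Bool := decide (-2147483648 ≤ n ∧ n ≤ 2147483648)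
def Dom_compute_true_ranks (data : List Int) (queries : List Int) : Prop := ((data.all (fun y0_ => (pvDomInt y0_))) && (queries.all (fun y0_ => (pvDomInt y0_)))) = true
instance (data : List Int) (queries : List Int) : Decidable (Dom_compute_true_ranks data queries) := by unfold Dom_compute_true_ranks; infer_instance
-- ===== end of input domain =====

-- B replaces A's per-query binary search with a two-pointer merge: query indices
-- sorted by value, one pointer sweeping the sorted data once (alternative algorithm).


-- ===== PORT A =====
-- data_sorted = sorted(data); for query in queries: ranks.append(bisect.bisect_right(data_sorted, query))
def compute_true_ranks (data : List Int) (queries : List Int) : List Int :=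
  let data_sorted := PySem.List.sorted data id
  queries.foldl (fun ranks query =>
    let idx := PySem.List.bisectRight data_sorted query
    let rank : Int := (idx : Int)
    ranks ++ [rank]) []

-- ===== PORT B =====
-- the inner 'while j < n and data_sorted[j] <= q: j += 1' loop
def advanceJ (ds : List Int) (q : Int) (j : Nat) : Nat :=
  if h : j < ds.length then
    if ds[j] ≤ q then advanceJ ds q (j + 1) else j
  else j
termination_by ds.length - j

-- data_sorted = sorted(data); order = sorted(range(len(queries)), key=queries.__getitem__);
-- ranks = [0]*len(queries); j = 0; for i in order: advance j; ranks[i] = j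
-- (queries[i] for the in-range index i is ported as queries.getD i 0)
def compute_true_ranks_alt (data : List Int) (queries : List Int) : List Int :=
  let data_sorted := PySem.List.sorted data id
  let order := PySem.List.sorted (List.range queries.length) (fun i => queries.getD i 0)
  (order.foldl (fun (st : List Int × Nat) i =>
      let q := queries.getD i 0
      let j := advanceJ data_sorted q st.2
      (st.1.set i (j : Int), j)) (List.replicate queries.length 0, 0)).1

-- ===== PRECONDITION & SPEC =====
def Spec_compute_true_ranks (data : List Int) (queries : List Int) (out : List Int) : Prop := out = compute_true_ranks_alt data queries
instance (data : List Int) (queries : List Int) (out : List Int) : Decidable (Spec_compute_true_ranks data queries out) := by unfold Spec_compute_true_ranks; infer_instance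

-- ===== CLAIM (what is proved, stated in full; the proofs are below) =====
def Claim_equal_compute_true_ranks : Prop := ∀ (data : List Int) (queries : List Int), Dom_compute_true_ranks data queries → Spec_compute_true_ranks data queries (compute_true_ranks data queries)

-- ===== LEMMAS AND PROOFS =====

-- In a ≤-sorted list, position k holds an element ≤ q iff k is below the count of elements ≤ q.
theorem sorted_count_char (q : Int) :
    ∀ (ds : List Int), List.Pairwise (fun a b => a ≤ b) ds →
      ∀ (k : Nat) (hk : k < ds.length), (ds[k] ≤ q ↔ k < ds.countP (fun y => y ≤ q)) := by
  intro ds hds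
  induction ds with
  | nil => intro k hk; simp at hk
  | cons a t ih =>
    rcases List.pairwise_cons.mp hds with ⟨ha, ht⟩
    intro k hk
    by_cases haq : a ≤ q
    · cases k with
      | zero => simp [haq]
      | succ n =>
        have hn : n < t.length := by simpa using hk
        have := ih ht n hn
        simp only [List.getElem_cons_succ, List.countP_cons, haq]
        simpa [Nat.lt_succ_iff, Nat.succ_lt_succ_iff] using this
    · have htz : t.countP (fun y => decide (y ≤ q)) = 0 := by
        apply List.countP_eq_zero.mpr
        intro b hb
        have := ha b hb
        simp; omega
      cases k with
      | zero => simp [haq, htz]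
      | succ n =>
        have hn : n < t.length := by simpa using hk
        have hmem : t[n] ∈ t := List.getElem_mem hn
        have := ha _ hmem
        simp only [List.getElem_cons_succ, List.countP_cons, haq, htz]
        constructor
        · intro h; omega
        · intro h; simp at h

-- The while loop lands exactly on the count, whenever it starts at or below it.
theorem advanceJ_eq_countP (ds : List Int) (hds : List.Pairwise (fun a b => a ≤ b) ds) (q : Int) :
    ∀ (j : Nat), j ≤ ds.countP (fun y => y ≤ q) → advanceJ ds q j = ds.countP (fun y => y ≤ q) := by
  intro j hj
  induction hfuel : ds.countP (fun y => y ≤ q) - j generalizing j with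
  | zero =>
    have hje : j = ds.countP (fun y => y ≤ q) := by omega
    rw [advanceJ]
    split
    · next h =>
      split
      · next h2 =>
        exact absurd ((sorted_count_char q ds hds j h).mp h2) (by omega)
      · exact hje
    · exact hje
  | succ n ih =>
    have hjlt : j < ds.countP (fun y => y ≤ q) := by omega
    have hjl : j < ds.length := lt_of_lt_of_le hjlt List.countP_le_length
    have hle : ds[j] ≤ q := (sorted_count_char q ds hds j hjl).mpr hjlt
    rw [advanceJ]
    simp only [hjl, hle, if_true, dif_pos]
    exact ih (j + 1) (by omega) (by omega)

-- The scatter loop, assuming ascending keys and a pointer at or below the first needed count,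
-- sets each visited index to its count.
theorem loop_spec (ds : List Int) (hds : List.Pairwise (fun a b => a ≤ b) ds)
    (queries : List Int) :
    ∀ (l : List Nat) (res : List Int) (j : Nat),
      List.Pairwise (fun a b => queries.getD a 0 ≤ queries.getD b 0) l →
      (∀ i ∈ l, j ≤ ds.countP (fun y => y ≤ queries.getD i 0)) →
      (l.foldl (fun (st : List Int × Nat) i =>
          let q := queries.getD i 0
          let j := advanceJ ds q st.2
          (st.1.set i (j : Int), j)) (res, j)).1
        = l.foldl (fun r i => r.set i ((ds.countP (fun y => y ≤ queries.getD i 0) : Int))) res := by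
  intro l
  induction l with
  | nil => intro res j _ _; rfl
  | cons i t ih =>
    intro res j hpw hlow
    rcases List.pairwise_cons.mp hpw with ⟨hi, ht⟩
    have hji : j ≤ ds.countP (fun y => y ≤ queries.getD i 0) := hlow i (List.mem_cons_self)
    have hadv : advanceJ ds (queries.getD i 0) j = ds.countP (fun y => y ≤ queries.getD i 0) :=
      advanceJ_eq_countP ds hds _ j hji
    simp only [List.foldl_cons, hadv]
    apply ih
    · exact ht
    · intro i' hi'
      apply List.countP_mono_left
      intro y _ h
      simp only [decide_eq_true_eq] at h ⊢
      have hk := hi i' hi'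
      omega

-- Scatter result: length is preserved …
theorem foldl_set_length (v : Nat → Int) :
    ∀ (l : List Nat) (res : List Int),
      (l.foldl (fun r i => r.set i (v i)) res).length = res.length := by
  intro l
  induction l with
  | nil => intro res; rfl
  | cons a t ih => intro res; simp [ih, List.length_set]

-- … and each position holds v i if visited, the old value otherwise.
theorem foldl_set_getElem (v : Nat → Int) :
    ∀ (l : List Nat) (res : List Int) (i : Nat) (hi : i < res.length)
      (h : i < (l.foldl (fun r i => r.set i (v i)) res).length),
      (l.foldl (fun r i => r.set i (v i)) res)[i] = if i ∈ l then v i else res[i] := by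
  intro l
  induction l with
  | nil => intro res i hi h; simp
  | cons a t ih =>
    intro res i hi h
    simp only [List.foldl_cons]
    rw [ih (res.set a (v a)) i (by simpa [List.length_set] using hi) (by simpa using h)]
    by_cases hit : i ∈ t
    · simp [hit]
    · by_cases hia : i = a
      · subst hia
        simp [hit, List.getElem_set_self (by simpa [List.length_set] using hi)]
      · simp [hit, hia, List.getElem_set_ne (fun h => hia h.symm)]

-- A's bisect equals the count (wrapper around bisectRight_spec).
theorem bisectRight_eq_countP (s : List Int) (x : Int)
    (hs : List.Pairwise (fun a b => a ≤ b) s) :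
    PySem.List.bisectRight s x = s.countP (fun y => y ≤ x) := by
  obtain ⟨hle, h1, h2⟩ := PySem.List.bisectRight_spec s x hs
  set r := PySem.List.bisectRight s x with hr
  have hsplit : s.countP (fun y => decide (y ≤ x)) =
      (s.take r).countP (fun y => decide (y ≤ x)) + (s.drop r).countP (fun y => decide (y ≤ x)) := by
    rw [← List.countP_append, List.take_append_drop]
  have hlen : (s.take r).length = r := by
    simp [List.length_take, Nat.min_eq_left hle]
  have htake : (s.take r).countP (fun y => decide (y ≤ x)) = r := by
    apply hlen ▸ List.countP_eq_length.mpr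
    intro a ha
    obtain ⟨j, hj, rfl⟩ := List.getElem_of_mem ha
    have hj' : j < r := by have := hj; rw [hlen] at this; exact this
    have hjs : j < s.length := lt_of_lt_of_le hj' hle
    have : (s.take r)[j] = s[j] := List.getElem_take
    rw [this]
    simpa using h1 j hjs hj'
  have hdrop : (s.drop r).countP (fun y => decide (y ≤ x)) = 0 := by
    apply List.countP_eq_zero.mpr
    intro a ha
    obtain ⟨j, hj, rfl⟩ := List.getElem_of_mem ha
    have hjs : r + j < s.length := by
      have := hj; simp [List.length_drop] at this; omega
    have : (s.drop r)[j] = s[r + j] := List.getElem_drop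
    rw [this]
    have := h2 (r + j) hjs (Nat.le_add_right r j)
    simp; omega
  simp only [hsplit, htake, hdrop]; omega

-- A's fold computes, per query, the count of sorted-data elements ≤ query.
theorem a_eq_map (data queries : List Int) :
    compute_true_ranks data queries
      = queries.map (fun q => (((PySem.List.sorted data id).countP (fun y => y ≤ q) : Nat) : Int)) := by
  unfold compute_true_ranks
  simp only [PySem.List.foldl_append_singleton_eq_map, List.nil_append]
  apply List.map_congr_left
  intro q _
  rw [bisectRight_eq_countP _ q (by
    have := PySem.List.sorted_pairwise data (id : Int → Int)
    simpa using this)]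

-- B's merge computes the same per-query counts, scattered to the original positions.
theorem b_eq_map (data queries : List Int) :
    compute_true_ranks_alt data queries
      = queries.map (fun q => (((PySem.List.sorted data id).countP (fun y => y ≤ q) : Nat) : Int)) := by
  unfold compute_true_ranks_alt
  set ds := PySem.List.sorted data id with hds_def
  have hds : List.Pairwise (fun a b => a ≤ b) ds := by
    have := PySem.List.sorted_pairwise data (id : Int → Int)
    simpa using this
  set m := queries.length with hm
  set key : Nat → Int := fun i => queries.getD i 0 with hkey
  set order := PySem.List.sorted (List.range m) key with horder
  have hpw : List.Pairwise (fun a b => key a ≤ key b) order :=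
    PySem.List.sorted_pairwise (List.range m) key
  have hperm : order.Perm (List.range m) := PySem.List.sorted_perm (List.range m) key false
  have hmem : ∀ i, i ∈ order ↔ i < m := by
    intro i; rw [hperm.mem_iff, List.mem_range]
  rw [loop_spec ds hds queries order (List.replicate m 0) 0 hpw (fun i _ => Nat.zero_le _)]
  apply List.ext_getElem
  · rw [foldl_set_length, List.length_replicate, List.length_map]
  · intro i hi1 hi2
    have him : i < m := by
      rw [foldl_set_length, List.length_replicate] at hi1; exact hi1
    rw [foldl_set_getElem _ order _ i (by simpa using him) hi1]
    have : i ∈ order := (hmem i).mpr him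
    simp only [this, if_true]
    rw [List.getElem_map]
    rw [List.getD_eq_getElem queries 0 him]

-- ===== VERDICT (by name: the statement is the Claim_ definition above) =====
theorem compute_true_ranks_spec : Claim_equal_compute_true_ranks := by
  intro data queries _
  unfold Spec_compute_true_ranks
  rw [a_eq_map, b_eq_map]
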